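-- pv_equiv track=rewrite | github.com/frontier-genomics/rna_cloud_genome_reference | rnacloud_genome_reference/common/gnomad.py | _split_ranges
-- ===== SOURCE A (Python) =====
-- def _split_ranges(start: int, stop: int, max_range: int = 50000) -> list[tuple[int, int]]:
--     """
--     Split a genomic range [start, stop] into subranges no larger than max_range.
--
--     Args:
--         start: The starting position (inclusive).
--         stop: The ending position (inclusive).
--         max_range: Maximum width of each subrange.
--
--     Returns:
--         A list of (sub_start, sub_stop) tuples.
--     """
--     ranges: list[tuple[int, int]] = []
--     current_start = start
--     while current_start <= stop:
--         current_stop = min(current_start + max_range - 1, stop)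
--         ranges.append((current_start, current_stop))
--         current_start = current_stop + 1
--     return ranges
-- ===== SOURCE B (Python) =====
-- def _split_ranges(start: int, stop: int, max_range: int = 50000) -> list[tuple[int, int]]:
--     """Divide and conquer: compute the number of chunks by ceiling division,
--     then build the list by recursively halving the chunk-index interval [i, j);
--     each leaf derives its subrange directly from its chunk index."""
--     if start > stop:
--         return []
--     n = -((start - stop - 1) // max_range)  # ceil((stop - start + 1) / max_range)
--
--     def rec(i: int, j: int) -> list[tuple[int, int]]:
--         if j - i == 1:
--             s = start + i * max_range
--             return [(s, min(s + max_range - 1, stop))]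
--         m = (i + j) // 2
--         return rec(i, m) + rec(m, j)
--
--     return rec(0, n)
-- ===== Notes on version B (the rewrite author's own statement) =====
-- stated objective: alternative
-- what changed: Replaces A's linear accumulator loop (each start fed back from the previous stop) with a divide-and-conquer scheme: the chunk count is obtained by one ceiling division and the list is assembled by recursively halving the chunk-index interval, each leaf computing its subrange independently by index arithmetic.
import Mathlib
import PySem

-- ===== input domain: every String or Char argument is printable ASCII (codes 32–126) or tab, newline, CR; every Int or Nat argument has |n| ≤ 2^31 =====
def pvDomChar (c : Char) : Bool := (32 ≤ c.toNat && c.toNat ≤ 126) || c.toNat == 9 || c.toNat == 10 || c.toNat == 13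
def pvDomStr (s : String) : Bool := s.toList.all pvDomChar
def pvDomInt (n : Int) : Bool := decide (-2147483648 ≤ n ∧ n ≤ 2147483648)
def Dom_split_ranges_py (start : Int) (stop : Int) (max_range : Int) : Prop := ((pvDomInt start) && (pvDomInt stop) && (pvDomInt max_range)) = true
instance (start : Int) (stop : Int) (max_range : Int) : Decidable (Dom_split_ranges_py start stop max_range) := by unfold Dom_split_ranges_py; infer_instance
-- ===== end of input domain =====

-- B replaces A's accumulator-threaded while loop by divide and conquer over
-- chunk indices (ceiling division for the count, binary recursion to build
-- the list); same result, no speed claim.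

-- ===== PORT A =====
-- A's while loop, fuel-bounded: with max_range ≥ 1 (or start > stop) the loop
-- terminates, and (stop+1-start).toNat + 1 units of fuel always suffice, so
-- the port is exact on Pre_.
def splitRangesLoop (stop max_range : Int) : Nat → Int → List (Int × Int) → List (Int × Int)
  | 0, _, ranges => ranges
  | fuel + 1, current_start, ranges =>
    if current_start ≤ stop then
      let current_stop := min (current_start + max_range - 1) stop
      splitRangesLoop stop max_range fuel (current_stop + 1) (ranges ++ [(current_start, current_stop)])
    else ranges

def split_ranges_py (start : Int) (stop : Int) (max_range : Int) : List (Int × Int) :=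
  splitRangesLoop stop max_range ((stop + 1 - start).toNat + 1) start []

-- ===== PORT B =====
-- B's inner rec(i, j): binary recursion over the chunk-index interval [i, j).
-- (The extra 'j ≤ i → []' branch only makes the Lean recursion total; B never
-- calls rec on an empty interval.)
def splitRec (start stop max_range : Int) (i j : Nat) : List (Int × Int) :=
  if j - i = 1 then
    [(start + (i : Int) * max_range,
      min (start + (i : Int) * max_range + max_range - 1) stop)]
  else if j ≤ i then []
  else
    splitRec start stop max_range i ((i + j) / 2) ++
      splitRec start stop max_range ((i + j) / 2) j
termination_by j - i
decreasing_by all_goals omega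

def split_ranges_py_alt (start : Int) (stop : Int) (max_range : Int) : List (Int × Int) :=
  if start > stop then []
  else
    splitRec start stop max_range 0
      (-(PySem.Int.floordiv (start - stop - 1) max_range)).toNat

-- ===== PRECONDITION & SPEC =====
-- Pre_ excludes only inputs where Python A never returns: with max_range ≤ 0
-- and start ≤ stop the while loop diverges (current_start never advances past
-- stop). Everywhere A returns — max_range ≥ 1, or start > stop — is admitted.
def Pre_split_ranges_py (start : Int) (stop : Int) (max_range : Int) : Prop :=
  1 ≤ max_range ∨ stop < start
instance (start : Int) (stop : Int) (max_range : Int) : Decidable (Pre_split_ranges_py start stop max_range) := by unfold Pre_split_ranges_py; infer_instance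
def pvWitness_split_ranges_py : Int × Int × Int := (1, 10, 4)

def Spec_split_ranges_py (start : Int) (stop : Int) (max_range : Int) (out : List (Int × Int)) : Prop := out = split_ranges_py_alt start stop max_range
instance (start : Int) (stop : Int) (max_range : Int) (out : List (Int × Int)) : Decidable (Spec_split_ranges_py start stop max_range out) := by unfold Spec_split_ranges_py; infer_instance

-- ===== CLAIM (what is proved, stated in full; the proofs are below) =====
def Claim_equal_split_ranges_py : Prop := ∀ (start : Int) (stop : Int) (max_range : Int), Dom_split_ranges_py start stop max_range → Pre_split_ranges_py start stop max_range → Spec_split_ranges_py start stop max_range (split_ranges_py start stop max_range)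

-- ===== LEMMAS AND PROOFS =====

theorem pyRange_pos_nil (a b s : Int) (hs : 0 < s) (h : b ≤ a) :
    PySem.List.pyRange a b s = [] := by
  rw [PySem.List.pyRange_of_pos a b hs, if_neg (by omega)]
  simp

theorem pyRange_pos_cons (a b s : Int) (hs : 0 < s) (h : a < b) :
    PySem.List.pyRange a b s = a :: PySem.List.pyRange (a + s) b s := by
  rw [PySem.List.pyRange_of_pos a b hs, PySem.List.pyRange_of_pos (a + s) b hs,
    if_pos h]
  have hcount : ((b - a + s - 1) / s).toNat
      = (if a + s < b then ((b - (a + s) + s - 1) / s).toNat else 0) + 1 := by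
    have h1 : b - a + s - 1 = (b - a - 1) + 1 * s := by ring
    have h2 : (b - a + s - 1) / s = (b - a - 1) / s + 1 := by
      rw [h1, Int.add_mul_ediv_right _ _ (by omega)]
    split_ifs with hb
    · have h3 : b - (a + s) + s - 1 = b - a - 1 := by ring
      rw [h3]
      have h5 : 0 ≤ (b - a - 1) / s := Int.ediv_nonneg (by omega) (by omega)
      omega
    · have h4 : (b - a - 1) / s = 0 := Int.ediv_eq_zero_of_lt (by omega) (by omega)
      omega
  rw [hcount, List.range_succ_eq_map]
  simp only [List.map_cons, List.map_map, Nat.cast_zero, mul_zero, add_zero]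
  congr 1
  apply List.map_congr_left
  intro k _
  simp only [Function.comp_apply]
  push_cast
  ring

-- A's loop computes the chunk headed at each element of range(cs, stop+1, mr).
theorem splitRangesLoop_eq (stop max_range : Int) (hmr : 1 ≤ max_range) :
    ∀ (fuel : Nat) (cs : Int) (acc : List (Int × Int)),
      (stop + 1 - cs).toNat ≤ fuel →
      splitRangesLoop stop max_range fuel cs acc
        = acc ++ (PySem.List.pyRange cs (stop + 1) max_range).map
            (fun s => (s, min (s + max_range - 1) stop)) := by
  intro fuel
  induction fuel with
  | zero =>
    intro cs acc hfuel
    rw [splitRangesLoop, pyRange_pos_nil _ _ _ (by omega) (by omega)]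
    simp
  | succ n ih =>
    intro cs acc hfuel
    rw [splitRangesLoop]
    split_ifs with hcs
    · have hcons := pyRange_pos_cons cs (stop + 1) max_range (by omega) (by omega)
      rw [hcons]
      have hnext : PySem.List.pyRange (cs + max_range) (stop + 1) max_range
          = PySem.List.pyRange (min (cs + max_range - 1) stop + 1) (stop + 1) max_range := by
        have hcst : min (cs + max_range - 1) stop + 1 = cs + max_range
            ∨ (min (cs + max_range - 1) stop = stop ∧ stop + 1 ≤ cs + max_range) := by
          omega
        rcases hcst with h | ⟨h1, h2⟩
        · rw [h]
        · rw [h1, pyRange_pos_nil _ _ _ (by omega) (by omega),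
            pyRange_pos_nil _ _ _ (by omega) (by omega)]
      rw [ih (min (cs + max_range - 1) stop + 1) (acc ++ [(cs, min (cs + max_range - 1) stop)]) (by omega),
        ← hnext]
      simp
    · rw [pyRange_pos_nil _ _ _ (by omega) (by omega)]
      simp

-- B's binary recursion produces exactly the chunks of indices i, i+1, …, j-1.
theorem splitRec_eq (start stop max_range : Int) :
    ∀ (d i j : Nat), j - i = d →
      splitRec start stop max_range i j
        = (List.range' i (j - i)).map
            (fun (k : Nat) => (start + (k : Int) * max_range,
              min (start + (k : Int) * max_range + max_range - 1) stop)) := by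
  intro d
  induction d using Nat.strong_induction_on with
  | _ d ih =>
    intro i j hd
    rw [splitRec]
    split_ifs with h1 h2
    · rw [h1]
      have : j = i + 1 := by omega
      simp
    · have : j - i = 0 := by omega
      rw [this]
      simp
    · have hij : i + 2 ≤ j := by omega
      have hm1 : i < (i + j) / 2 := by omega
      have hm2 : (i + j) / 2 < j := by omega
      rw [ih ((i + j) / 2 - i) (by omega) i ((i + j) / 2) rfl,
        ih (j - (i + j) / 2) (by omega) ((i + j) / 2) j rfl,
        ← List.map_append]
      congr 1
      have := List.range'_append (s := i) (m := (i + j) / 2 - i)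
        (n := j - (i + j) / 2) (step := 1)
      have he1 : i + 1 * ((i + j) / 2 - i) = (i + j) / 2 := by omega
      have he2 : (i + j) / 2 - i + (j - (i + j) / 2) = j - i := by omega
      rw [he1, he2] at this
      exact this

-- the ceiling-division chunk count equals the length of range(start, stop+1, mr)
theorem count_eq (start stop max_range : Int) (hmr : 1 ≤ max_range) :
    -(PySem.Int.floordiv (start - stop - 1) max_range)
      = (stop + 1 - start + max_range - 1) / max_range := by
  have harg : start - stop - 1 = -(stop - start + 1) := by ring
  rw [harg, PySem.Int.neg_floordiv_neg_eq_iff_of_pos (by omega)]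
  have hd1 := Int.mul_ediv_add_emod (stop + 1 - start + max_range - 1) max_range
  have hd2 := Int.emod_nonneg (stop + 1 - start + max_range - 1) (by omega : max_range ≠ 0)
  have hd3 := Int.emod_lt_of_pos (stop + 1 - start + max_range - 1) (by omega : 0 < max_range)
  constructor <;> nlinarith

-- ===== VERDICT (by name: the statement is the Claim_ definition above) =====
theorem split_ranges_py_spec : Claim_equal_split_ranges_py := by
  intro start stop max_range _ hpre
  unfold Spec_split_ranges_py split_ranges_py split_ranges_py_alt
  by_cases hss : stop < start
  · rw [if_pos (by omega), splitRangesLoop, if_neg (by omega)]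
  · have hmr : 1 ≤ max_range := by
      rcases hpre with h | h
      · exact h
      · omega
    rw [if_neg (by omega),
      splitRangesLoop_eq stop max_range hmr _ start [] (by omega),
      List.nil_append,
      PySem.List.pyRange_of_pos start (stop + 1) (by omega),
      if_pos (by omega),
      splitRec_eq start stop max_range _ 0 _ rfl,
      count_eq start stop max_range hmr]
    rw [Nat.sub_zero, ← List.range_eq_range', List.map_map]
    apply List.map_congr_left
    intro k _
    simp only [Function.comp_apply]
    rw [Int.mul_comm]
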